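-- pv_equiv track=rewrite | github.com/Vladimir-Moskov/PythonInterview | Companies/interview_zalando.py | solution
-- ===== SOURCE A (Python) =====
-- def solution(given_str):
--     """
--          solution itself
--           write your code in Python 3.6
--          :param given_str: input str
--          :return:
--          """
--     result = 0
--     lead_zero_index = 0
--
--     # get rid of leading zero
--     while given_str[lead_zero_index] == "0":
--         lead_zero_index += 1
--
--     # run calculation
--     current_index = len(given_str)
--     for last_bit in reversed(given_str):
--         current_index -= 1
--         # count until met leading zeros
--         if current_index > lead_zero_index:
--             if last_bit == "0":
--                 result += 1
--             else:
--                 result += 2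
--         # last '1' should be count as last step
--         elif current_index == lead_zero_index:
--             result += 1
--
--     return result
-- ===== SOURCE B (Python) =====
-- def solution(given_str):
--     total = 0
--     seen = False
--     for ch in given_str:
--         if seen:
--             total += 1 if ch == "0" else 2
--         elif ch != "0":
--             seen = True
--             total = 1
--     return total
-- ===== Notes on version B (the rewrite author's own statement) =====
-- stated objective: simpler
-- what changed: replaces A's two-phase algorithm (leading-zero index scan, then a reversed per-character loop comparing each index against that scan result) by one forward pass with a boolean seen-flag state machine and no index arithmetic at all
import Mathlib
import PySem

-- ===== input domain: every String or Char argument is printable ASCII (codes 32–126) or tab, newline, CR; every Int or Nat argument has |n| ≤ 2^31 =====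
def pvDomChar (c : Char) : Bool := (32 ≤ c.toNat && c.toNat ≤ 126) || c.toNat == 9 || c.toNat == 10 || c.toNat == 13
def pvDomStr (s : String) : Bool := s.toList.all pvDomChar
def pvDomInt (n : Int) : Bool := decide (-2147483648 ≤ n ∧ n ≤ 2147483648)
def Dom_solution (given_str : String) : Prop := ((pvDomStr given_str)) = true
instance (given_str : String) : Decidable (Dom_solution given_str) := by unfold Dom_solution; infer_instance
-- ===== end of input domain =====

-- B replaces A's two-phase scan-then-reversed-weighted-loop by one forward pass
-- with a boolean seen-flag state (objective: simpler).

-- ===== PORT A =====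
-- the 'while given_str[lead_zero_index] == "0"' scan; on an all-'0'/empty string
-- Python raises IndexError (excluded by Pre_), here the recursion just ends
def leadScanA : List Char → Int → Int
  | [], i => i
  | c :: cs, i => if c = '0' then leadScanA cs (i + 1) else i

def solution (given_str : String) : Int :=
  let l := given_str.toList
  let lz := leadScanA l 0
  (l.reverse.foldl
    (fun (st : Int × Int) (c : Char) =>
      let ci := st.2 - 1
      if ci > lz then (if c = '0' then (st.1 + 1, ci) else (st.1 + 2, ci))
      else if ci = lz then (st.1 + 1, ci) else (st.1, ci))
    (0, (l.length : Int))).1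

-- ===== PORT B =====
-- forward pass, state = (total, seen)
def solution_alt (given_str : String) : Int :=
  (given_str.toList.foldl
    (fun (st : Int × Bool) (c : Char) =>
      if st.2 then (st.1 + (if c = '0' then 1 else 2), true)
      else if c ≠ '0' then (1, true)
      else st)
    (0, false)).1

-- ===== PRECONDITION & SPEC =====
-- Pre_ excludes exactly the inputs (empty or all-'0' strings) on which A's leading-zero
-- scan runs past the end and Python raises IndexError.
def Pre_solution (given_str : String) : Prop := (given_str.toList.any (fun c => c ≠ '0')) = true
instance (given_str : String) : Decidable (Pre_solution given_str) := by unfold Pre_solution; infer_instance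
def pvWitness_solution : String := "0110"

def Spec_solution (given_str : String) (out : Int) : Prop := out = solution_alt given_str
instance (given_str : String) (out : Int) : Decidable (Spec_solution given_str out) := by unfold Spec_solution; infer_instance

-- ===== CLAIM (what is proved, stated in full; the proofs are below) =====
def Claim_equal_solution : Prop := ∀ (given_str : String), Dom_solution given_str → Pre_solution given_str → Spec_solution given_str (solution given_str)

-- ===== LEMMAS AND PROOFS =====

-- the weighted sum A's loop computes, positions counted from j
def W : List Char → Int → Int → Int
  | [], _, _ => 0
  | c :: cs, j, lz =>
      (if j > lz then (if c = '0' then 1 else 2) else if j = lz then 1 else 0) + W cs (j + 1) lz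

-- number of leading '0' characters (Nat form of A's scan result)
def leadZeros : List Char → Nat
  | [] => 0
  | c :: cs => if c = '0' then leadZeros cs + 1 else 0

lemma leadScan_eq : ∀ (l : List Char) (i : Int), leadScanA l i = i + leadZeros l := by
  intro l
  induction l with
  | nil => intro i; simp [leadScanA, leadZeros]
  | cons c cs ih =>
      intro i
      simp only [leadScanA, leadZeros]
      split_ifs with h
      · rw [ih]; push_cast; ring
      · simp

lemma foldrW : ∀ (t : List Char) (m lz : Int),
    List.foldr (fun c (st : Int × Int) =>
      let ci := st.2 - 1
      if ci > lz then (if c = '0' then (st.1 + 1, ci) else (st.1 + 2, ci))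
      else if ci = lz then (st.1 + 1, ci) else (st.1, ci)) (0, m) t
    = (W t (m - t.length) lz, m - t.length) := by
  intro t
  induction t with
  | nil => intro m lz; simp [W]
  | cons c cs ih =>
      intro m lz
      simp only [List.foldr, ih, W, List.length_cons, Nat.cast_add, Nat.cast_one]
      have h1 : m - ((cs.length : Int) + 1) = m - (cs.length : Int) - 1 := by ring
      have h2 : m - (cs.length : Int) - 1 + 1 = m - (cs.length : Int) := by ring
      simp only [h1, h2]
      split_ifs <;> simp [Prod.ext_iff] <;> ring

lemma W_shift : ∀ (t : List Char) (j lz : Int), W t (j + 1) (lz + 1) = W t j lz := by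
  intro t
  induction t with
  | nil => intro j lz; simp [W]
  | cons c cs ih =>
      intro j lz
      simp only [W, ih, gt_iff_lt, add_lt_add_iff_right, add_left_inj]

-- B's fold once 'seen' is set adds 1 per '0' character and 2 per other character
lemma B_seen : ∀ (t : List Char) (a : Int),
    t.foldl (fun (st : Int × Bool) (c : Char) =>
      if st.2 then (st.1 + (if c = '0' then 1 else 2), true)
      else if c ≠ '0' then (1, true) else st) (a, true)
    = (a + (t.foldr (fun c s => (if c = '0' then 1 else 2) + s) (0 : Int)), true) := by
  intro t
  induction t with
  | nil => intro a; simp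
  | cons c cs ih =>
      intro a
      simp only [List.foldl, List.foldr, if_pos, ih]
      split_ifs <;> simp <;> ring

-- A's weighted sum strictly past the lead index is the same per-character weight sum
lemma W_gt : ∀ (t : List Char) (j lz : Int), j > lz →
    W t j lz = t.foldr (fun c s => (if c = '0' then 1 else 2) + s) (0 : Int) := by
  intro t
  induction t with
  | nil => intro j lz _; simp [W]
  | cons c cs ih =>
      intro j lz h
      have h' : j + 1 > lz := by omega
      simp only [W, if_pos h, ih _ _ h', List.foldr]
  
-- on strings containing a non-'0' character, B's forward fold computes A's weighted sum
lemma B_eq_W : ∀ (l : List Char), (∃ c ∈ l, c ≠ '0') →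
    (l.foldl (fun (st : Int × Bool) (c : Char) =>
      if st.2 then (st.1 + (if c = '0' then 1 else 2), true)
      else if c ≠ '0' then (1, true) else st) (0, false)).1
    = W l 0 (leadZeros l) := by
  intro l
  induction l with
  | nil => intro h; simp at h
  | cons c cs ih =>
      intro h
      by_cases hc : c = '0'
      · have hcs : ∃ x ∈ cs, x ≠ '0' := by
          rcases h with ⟨x, hx, hx0⟩
          rcases List.mem_cons.mp hx with rfl | hm
          · exact absurd hc hx0
          · exact ⟨x, hm, hx0⟩
        subst hc
        simp only [List.foldl, leadZeros, W, ne_eq, reduceIte, Bool.false_eq_true, not_true_eq_false]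
        have hk1 : ¬ ((0 : Int) > ((leadZeros cs + 1 : Nat) : Int)) := by push_cast; omega
        have hk2 : ¬ ((0 : Int) = ((leadZeros cs + 1 : Nat) : Int)) := by push_cast; omega
        rw [if_neg hk1, if_neg hk2]
        have hco : ((leadZeros cs + 1 : Nat) : Int) = (leadZeros cs : Int) + 1 := by push_cast; ring
        rw [hco, W_shift cs 0 (leadZeros cs), ← ih hcs]
        simp
      · simp only [List.foldl, leadZeros, W, ne_eq, hc, Bool.false_eq_true,
          not_false_eq_true, if_true, if_false, Nat.cast_zero]
        rw [B_seen, W_gt cs (0 + 1) 0 (by omega)]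
        simp

-- ===== VERDICT (by name: the statement is the Claim_ definition above) =====
theorem solution_spec : Claim_equal_solution := by
  intro s _ hpre
  unfold Pre_solution at hpre
  rw [List.any_eq_true] at hpre
  simp only [decide_eq_true_eq] at hpre
  unfold Spec_solution solution solution_alt
  simp only [List.foldl_reverse]
  rw [foldrW s.toList (s.toList.length : Int) (leadScanA s.toList 0)]
  simp only [sub_self]
  rw [leadScan_eq s.toList 0, zero_add, B_eq_W s.toList hpre]
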